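-- pv_equiv track=rewrite | github.com/Benjamin-Currie/advent-of-code | 2025/day_03/aoc202503.py | part_one
-- ===== SOURCE A (Python) =====
-- def part_one(data):
--     """Solve part 1."""
--     total = 0
--     for row in data:
--         l = max(row)
--         if row.index(l) == len(row) - 1:
--             r = l
--             l = max(row[:-1])
--         else:
--             r = max(row[row.index(l) + 1 :])
--         total += int(f"{l}{r}")
--     return total
-- ===== SOURCE B (Python) =====
-- def part_one(data):
--     """Solve part 1."""
--     total = 0
--     for row in data:
--         # single left-to-right pass: running best-first-digit (only positions before
--         # the last may start the pair) and running best-second-digit after it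
--         first = None
--         second = None
--         for j, x in enumerate(row):
--             if j + 1 < len(row) and (first is None or first < x):
--                 first, second = x, None
--             elif second is None or second < x:
--                 second = x
--         total += int(f"{first}{second}")
--     return total
-- ===== Notes on version B (the rewrite author's own statement) =====
-- stated objective: alternative
-- what changed: B replaces A's max/index/slice/max passes and its 'is the max at the last position?' branch by a single left-to-right scan per row that maintains (best first digit over positions before the last, best second digit seen after it), resetting the second whenever the first improves.
import Mathlib
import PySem

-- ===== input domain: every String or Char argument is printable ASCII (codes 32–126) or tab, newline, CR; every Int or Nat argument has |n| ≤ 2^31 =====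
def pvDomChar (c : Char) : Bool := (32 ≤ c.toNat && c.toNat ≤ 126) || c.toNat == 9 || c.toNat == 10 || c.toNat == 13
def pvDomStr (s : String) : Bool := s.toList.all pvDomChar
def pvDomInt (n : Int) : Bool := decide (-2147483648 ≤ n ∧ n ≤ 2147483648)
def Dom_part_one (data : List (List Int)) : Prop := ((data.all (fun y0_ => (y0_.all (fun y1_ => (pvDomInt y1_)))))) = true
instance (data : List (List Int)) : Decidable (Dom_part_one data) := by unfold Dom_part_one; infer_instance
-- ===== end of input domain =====

-- B replaces A's max/index/slice passes and its last-position branch by a single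
-- left-to-right scan per row maintaining (best first digit, best second after it);
-- same asymptotic cost, no speed claim.

-- int(f"{l}{r}")  (shared by both ports; Python raises ValueError when r < 0 — excluded by Pre_)
def pvCat (l r : Int) : Int := (PySem.Int.ofStr? (PySem.Int.toStr l ++ PySem.Int.toStr r)).getD 0

-- ===== PORT A =====
-- loop body of A: l = max(row); branch on row.index(l) == len(row)-1
def pvRowA (row : List Int) : Int :=
  let l := (PySem.List.max? row (fun y => y)).getD 0
  if (PySem.List.index? row l).getD 0 = row.length - 1 then
    pvCat ((PySem.List.max? (PySem.List.slice row none (some (-1))) (fun y => y)).getD 0) l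
  else
    pvCat l ((PySem.List.max? (PySem.List.slice row (some (((PySem.List.index? row l).getD 0 : Int) + 1)) none) (fun y => y)).getD 0)

def part_one (data : List (List Int)) : Int :=
  data.foldl (fun total row => total + pvRowA row) 0

-- ===== PORT B =====
-- second is None or second < x  →  new second
def pvUpd (o : Option Int) (x : Int) : Option Int :=
  match o with
  | none => some x
  | some s => if s < x then some x else some s

-- inner-loop body of B at (j, x): j+1 < len(row) and (first is None or first < x)
def pvStep (n : Nat) (st : Option Int × Option Int) (p : Int × Int) : Option Int × Option Int :=
  if p.1 + 1 < (n : Int) && (match st.1 with | none => true | some f => decide (f < p.2)) then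
    (some p.2, none)
  else
    (st.1, pvUpd st.2 p.2)

-- per-row scan; the `.getD 0` on first/second is only reachable on rows with < 2
-- elements, where the Python raises (excluded by Pre_)
def pvRowVal (row : List Int) : Int :=
  let st := (PySem.List.enumerate row).foldl (pvStep row.length) (none, none)
  pvCat (st.1.getD 0) (st.2.getD 0)

def part_one_alt (data : List (List Int)) : Int :=
  data.foldl (fun total row => total + pvRowVal row) 0

-- ===== PRECONDITION & SPEC =====
-- Pre_ excludes exactly the inputs on which A raises: a row with fewer than two elements
-- (max of an empty sequence) and a row whose right number would be negative
-- (int(f"{l}{r}") with r < 0 is a ValueError); B raises on exactly the same inputs.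
def pvRowOk (row : List Int) : Bool :=
  match PySem.List.max? row (fun y => y) with
  | none => false
  | some m =>
    decide (2 ≤ row.length) &&
    (let i := (PySem.List.index? row m).getD 0
     if i + 1 = row.length then decide (0 ≤ m)
     else (row.drop (i + 1)).any (fun x => decide (0 ≤ x)))

def Pre_part_one (data : List (List Int)) : Prop := ∀ row ∈ data, pvRowOk row = true
instance (data : List (List Int)) : Decidable (Pre_part_one data) := by
  unfold Pre_part_one; infer_instance

def pvWitness_part_one : List (List Int) := [[1, 2], [5, 3, 4], [-1, 5, 3]]

def Spec_part_one (data : List (List Int)) (out : Int) : Prop := out = part_one_alt data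
instance (data : List (List Int)) (out : Int) : Decidable (Spec_part_one data out) := by
  unfold Spec_part_one; infer_instance

-- ===== CLAIM (what is proved, stated in full; the proofs are below) =====
def Claim_equal_part_one : Prop :=
  ∀ (data : List (List Int)), Dom_part_one data → Pre_part_one data →
    Spec_part_one data (part_one data)

-- ===== LEMMAS AND PROOFS =====

-- reference value of one row: first = max(row[:-1]), i = its first index, second = max(row[i+1:])
def pvRef (row : List Int) : Int :=
  let first := (PySem.List.max? (PySem.List.slice row none (some (-1))) (fun y => y)).getD 0
  let i := (PySem.List.index? row first).getD 0
  let second := (PySem.List.max? (PySem.List.slice row (some ((i : Int) + 1)) none) (fun y => y)).getD 0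
  pvCat first second

lemma pvRowOk_len {row : List Int} (h : pvRowOk row = true) : 2 ≤ row.length := by
  unfold pvRowOk at h
  cases hm : PySem.List.max? row (fun y => y) with
  | none => simp [hm] at h
  | some m => rw [hm] at h; simp at h; exact h.1

lemma max?_spec (xs : List Int) (hne : xs ≠ []) :
    ∃ M, PySem.List.max? xs (fun y => y) = some M ∧ M ∈ xs ∧ ∀ y ∈ xs, y ≤ M := by
  cases hm : PySem.List.max? xs (fun y => y) with
  | none => exact absurd ((PySem.List.max?_eq_none_iff xs _).mp hm) hne
  | some m => exact ⟨m, rfl, PySem.List.max?_mem hm, fun y hy => PySem.List.max?_isMax hm y hy⟩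

lemma max?_val (xs : List Int) {M : Int} (hmem : M ∈ xs) (hle : ∀ y ∈ xs, y ≤ M) :
    PySem.List.max? xs (fun y => y) = some M := by
  obtain ⟨m, hm, hmm, hml⟩ := max?_spec xs (by rintro rfl; simp at hmem)
  rw [hm, le_antisymm (hml M hmem) (hle m hmm)]

lemma index?_spec (xs : List Int) {v : Int} (hv : v ∈ xs) :
    ∃ k, PySem.List.index? xs v = some k ∧
      ∃ hk : k < xs.length, xs[k] = v ∧ ∀ j (hj : j < k), xs[j] ≠ v := by
  cases hk : PySem.List.index? xs v with
  | none => rw [← PySem.List.index?_isSome_iff] at hv; rw [hk] at hv; simp at hv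
  | some k => exact ⟨k, rfl, PySem.List.getElem_of_index?_eq_some hk⟩

lemma mem_drop_of_getElem (xs : List Int) (n j : Nat) (hj : j < xs.length) (hnj : n ≤ j) :
    xs[j] ∈ xs.drop n := by
  have hlt : j - n < (xs.drop n).length := by simp [List.length_drop]; omega
  have : (xs.drop n)[j - n] = xs[j] := by
    rw [List.getElem_drop]; congr 1; omega
  rw [← this]; exact List.getElem_mem hlt

-- A's row value equals the reference
lemma row_eq (row : List Int) (h2 : 2 ≤ row.length) : pvRowA row = pvRef row := by
  have hne : row ≠ [] := by rintro rfl; simp at h2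
  obtain ⟨M, hM, hMmem, hMle⟩ := max?_spec row hne
  obtain ⟨k, hk, hklt, hkM, hkmin⟩ := index?_spec row hMmem
  have hdl : row.dropLast ≠ [] := by
    intro h
    have := List.length_dropLast (xs := row)
    rw [h] at this; simp at this; omega
  obtain ⟨F, hF, hFmem, hFle⟩ := max?_spec row.dropLast hdl
  have hFrow : F ∈ row := (List.dropLast_sublist row).mem hFmem
  have hcast : ∀ n : Nat, ((n : Int) + 1).toNat = n + 1 := by intro n; omega
  unfold pvRowA pvRef
  simp only [hM, hk, Option.getD_some, PySem.List.slice_to_neg_one, hF]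
  by_cases hcase : k = row.length - 1
  · rw [if_pos hcase]
    obtain ⟨jF, hjF, hjFv⟩ := List.getElem_of_mem hFmem
    have hjFlen : jF < row.length - 1 := by
      have := List.length_dropLast (xs := row); omega
    have hjFrow : row[jF]'(by omega) = F := by
      rw [← hjFv]; exact (List.getElem_dropLast _).symm
    obtain ⟨k', hk', hk'lt, hk'F, hk'min⟩ := index?_spec row hFrow
    have hk'le : k' ≤ jF := by
      by_contra h
      exact hk'min jF (by omega) hjFrow
    simp only [hk', Option.getD_some]
    have hlast : row[row.length - 1]'(by omega) = M := by
      have : k = row.length - 1 := hcase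
      subst this; exact hkM
    have hMdrop : M ∈ row.drop (k' + 1) := by
      rw [← hlast]; exact mem_drop_of_getElem row (k' + 1) (row.length - 1) (by omega) (by omega)
    have hdropmax : PySem.List.max? (row.drop (k' + 1)) (fun y => y) = some M :=
      max?_val _ hMdrop (fun y hy => hMle y (List.mem_of_mem_drop hy))
    rw [PySem.List.slice_from row (by omega), hcast k', hdropmax]
    rfl
  · rw [if_neg hcase]
    have hMdl : M ∈ row.dropLast := by
      have hklen : k < row.length - 1 := by omega
      have h1 : k < row.dropLast.length := by
        rw [List.length_dropLast]; omega
      have : row.dropLast[k] = M := by rw [List.getElem_dropLast]; exact hkM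
      rw [← this]; exact List.getElem_mem h1
    have hFM : F = M := le_antisymm (hMle F hFrow) (hFle M hMdl)
    subst hFM
    simp only [hk, Option.getD_some]

-- the scan step with the position bound satisfied (indices strictly before the last)
def sstep (st : Option Int × Option Int) (x : Int) : Option Int × Option Int :=
  if (match st.1 with | none => true | some f => decide (f < x)) then (some x, none)
  else (st.1, pvUpd st.2 x)

lemma foldl_enumerate_sstep (pfx : List Int) :
    ∀ (s : Int) (n : Nat) (st : Option Int × Option Int), 0 ≤ s → s + pfx.length ≤ (n : Int) - 1 →
      (PySem.List.enumerate pfx s).foldl (pvStep n) st = pfx.foldl sstep st := by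
  induction pfx with
  | nil => intro s n st _ _; simp [PySem.List.enumerate_nil]
  | cons x t ih =>
    intro s n st hs hb
    rw [PySem.List.enumerate_cons]
    simp only [List.foldl_cons]
    have h1 : s + 1 < (n : Int) := by simp at hb; omega
    have hcond : pvStep n st (s, x) = sstep st x := by
      unfold pvStep sstep
      simp [h1]
    rw [hcond]
    exact ih (s + 1) n _ (by omega) (by simp at hb ⊢; omega)

lemma pvUpd_some (m x : Int) : pvUpd (some m) x = some (max m x) := by
  simp only [pvUpd]
  split_ifs with h
  · rw [max_eq_right (le_of_lt h)]
  · rw [max_eq_left (by omega)]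

lemma max?_append_singleton (d : List Int) (x : Int) :
    PySem.List.max? (d ++ [x]) (fun y => y) = pvUpd (PySem.List.max? d (fun y => y)) x := by
  cases d with
  | nil =>
    rw [(PySem.List.max?_eq_none_iff ([] : List Int) (fun y => y)).mpr rfl]
    simp [PySem.List.max?_id_cons, pvUpd]
  | cons h t =>
    rw [List.cons_append, PySem.List.max?_id_cons, PySem.List.max?_id_cons,
        List.foldl_append, pvUpd_some]
    rfl

-- characterization of the scan over a nonempty prefix
lemma scan_char (pfx : List Int) (hne : pfx ≠ []) :
    ∃ M i, pfx.foldl sstep (none, none) =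
        (some M, PySem.List.max? (pfx.drop (i + 1)) (fun y => y)) ∧
      PySem.List.max? pfx (fun y => y) = some M ∧
      PySem.List.index? pfx M = some i := by
  induction pfx using List.reverseRecOn with
  | nil => exact absurd rfl hne
  | append_singleton d x ih =>
    by_cases hdnil : d = []
    · subst hdnil
      refine ⟨x, 0, ?_, ?_, ?_⟩
      · simp [sstep, (PySem.List.max?_eq_none_iff ([] : List Int) (fun y => y)).mpr rfl]
      · simp [PySem.List.max?_id_cons]
      · rw [List.nil_append, PySem.List.index?_cons_self]
    · obtain ⟨M, i, hfold, hmax, hidx⟩ := ih hdnil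
      obtain ⟨ilt, hiM, _⟩ := PySem.List.getElem_of_index?_eq_some hidx
      rw [List.foldl_append, hfold]
      by_cases hMx : M < x
      · refine ⟨x, d.length, ?_, ?_, ?_⟩
        · have hstep : sstep (some M, PySem.List.max? (d.drop (i + 1)) (fun y => y)) x = (some x, none) := by
            unfold sstep; simp [hMx]
          rw [List.foldl_cons, List.foldl_nil, hstep]
          have hnil : (d ++ [x]).drop (d.length + 1) = [] := by
            apply List.drop_eq_nil_of_le; simp
          rw [hnil, (PySem.List.max?_eq_none_iff ([] : List Int) (fun y => y)).mpr rfl]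
        · rw [max?_append_singleton, hmax, pvUpd_some, max_eq_right (le_of_lt hMx)]
        · exact PySem.List.index?_append_singleton_self d x
            (fun hmem => absurd (PySem.List.max?_isMax hmax x hmem) (by omega))
      · refine ⟨M, i, ?_, ?_, ?_⟩
        · have hstep : sstep (some M, PySem.List.max? (d.drop (i + 1)) (fun y => y)) x
              = (some M, pvUpd (PySem.List.max? (d.drop (i + 1)) (fun y => y)) x) := by
            unfold sstep; simp [hMx]
          rw [List.foldl_cons, List.foldl_nil, hstep]
          have hdrop : (d ++ [x]).drop (i + 1) = d.drop (i + 1) ++ [x] :=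
            List.drop_append_of_le_length (by omega)
          rw [hdrop, max?_append_singleton]
        · rw [max?_append_singleton, hmax, pvUpd_some, max_eq_left (by omega)]
        · rw [PySem.List.index?_append_of_mem _ (PySem.List.max?_mem hmax)]
          exact hidx

-- B's row value equals the reference
lemma scan_eq (row : List Int) (h2 : 2 ≤ row.length) : pvRowVal row = pvRef row := by
  have hne : row ≠ [] := by rintro rfl; simp at h2
  have hdl : row.dropLast ≠ [] := by
    intro h
    have := List.length_dropLast (xs := row)
    rw [h] at this; simp at this; omega
  obtain ⟨M, i, hfold, hmax, hidx⟩ := scan_char row.dropLast hdl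
  obtain ⟨ilt, _, _⟩ := PySem.List.getElem_of_index?_eq_some hidx
  have hsplit : row = row.dropLast ++ [row.getLast hne] := (List.dropLast_append_getLast hne).symm
  have hlen : row.length = row.dropLast.length + 1 := by
    rw [List.length_dropLast]; omega
  have hcast : ∀ n : Nat, ((n : Int) + 1).toNat = n + 1 := by intro n; omega
  have henum : PySem.List.enumerate row 0
      = PySem.List.enumerate row.dropLast 0 ++ [((row.dropLast.length : Int), row.getLast hne)] := by
    conv_lhs => rw [hsplit]
    rw [PySem.List.enumerate_append, PySem.List.enumerate_cons, PySem.List.enumerate_nil]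
    norm_num
  have hidxrow : PySem.List.index? row M = some i := by
    conv_lhs => rw [hsplit]
    rw [PySem.List.index?_append_of_mem _ (PySem.List.max?_mem hmax)]
    exact hidx
  have hdroprow : row.drop (i + 1) = row.dropLast.drop (i + 1) ++ [row.getLast hne] := by
    conv_lhs => rw [hsplit]
    exact List.drop_append_of_le_length (by omega)
  have hlaststep : pvStep row.length
      (some M, PySem.List.max? (row.dropLast.drop (i + 1)) (fun y => y))
      ((row.dropLast.length : Int), row.getLast hne)
      = (some M, pvUpd (PySem.List.max? (row.dropLast.drop (i + 1)) (fun y => y)) (row.getLast hne)) := by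
    unfold pvStep
    have hlt : ¬ (((row.length - 1 : Nat) : Int) + 1 < (row.length : Int)) := by omega
    simp [hlt]
  unfold pvRowVal pvRef
  rw [henum, List.foldl_append,
      foldl_enumerate_sstep _ 0 row.length _ (by omega) (by rw [hlen]; push_cast; omega),
      hfold]
  simp only [List.foldl_cons, List.foldl_nil, hlaststep]
  rw [PySem.List.slice_to_neg_one, hmax, Option.getD_some, hidxrow, Option.getD_some,
      PySem.List.slice_from _ (by omega), hcast i, hdroprow, max?_append_singleton]

theorem part_one_fold (data : List (List Int)) (h : ∀ row ∈ data, pvRowOk row = true) :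
    ∀ acc : Int, data.foldl (fun total row => total + pvRowA row) acc
      = data.foldl (fun total row => total + pvRowVal row) acc := by
  induction data with
  | nil => intro acc; rfl
  | cons r t ih =>
    intro acc
    simp only [List.foldl_cons]
    rw [row_eq r (pvRowOk_len (h r (by simp))), ← scan_eq r (pvRowOk_len (h r (by simp)))]
    exact ih (fun x hx => h x (by simp [hx])) _

-- ===== VERDICT (by name: the statement is the Claim_ definition above) =====
theorem part_one_spec : Claim_equal_part_one := by
  intro data _ hpre
  unfold Spec_part_one part_one part_one_alt
  exact part_one_fold data hpre 0
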